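-- pv_equiv track=rewrite | github.com/yaoziyaoguai/my-first-agent | agent/cli_renderer.py | summarize_health
-- ===== SOURCE A (Python) =====
-- from collections.abc import Mapping
-- from typing import Any
--
-- def summarize_health(results: Mapping[str, Mapping[str, Any]] | None) -> str:
--     """把 health_check 结果压成一行可读摘要。
--
--     示例：
--     - 全 pass："all checks passed"
--     - 有 warn："3 warn (workspace_lint, log_size, session_accumulation)"
--     - 输入为 None / 空："skipped"
--
--     刻意不重复 health_check 已经打的长报告内容；如果用户想看详情，
--     用 `python main.py health` 单独跑（v0.2 已落地的子命令）。
--     """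
--     if not results:
--         return "skipped"
--
--     warns = [
--         name
--         for name, result in results.items()
--         if isinstance(result, Mapping) and result.get("status") == "warn"
--     ]
--     errors = [
--         name
--         for name, result in results.items()
--         if isinstance(result, Mapping) and result.get("status") == "error"
--     ]
--     if not warns and not errors:
--         return "all checks passed"
--     parts: list[str] = []
--     if warns:
--         parts.append(f"{len(warns)} warn ({', '.join(warns)})")
--     if errors:
--         parts.append(f"{len(errors)} error ({', '.join(errors)})")
--     parts.append("详情：python main.py health")
--     return "; ".join(parts)
-- ===== SOURCE B (Python) =====
-- from collections.abc import Mapping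
-- from itertools import groupby
-- from typing import Any
--
--
-- def summarize_health(results: Mapping[str, Mapping[str, Any]] | None) -> str:
--     """Sort-then-groupby: tag flagged names, stable-sort warn-before-error, format runs."""
--     if not results:
--         return "skipped"
--
--     tagged = [
--         (result.get("status"), name)
--         for name, result in results.items()
--         if isinstance(result, Mapping) and result.get("status") in ("warn", "error")
--     ]
--     if not tagged:
--         return "all checks passed"
--
--     tagged.sort(key=lambda t: t[0] != "warn")  # stable: warns first, insertion order kept
--     parts = [
--         f"{len(names)} {status} ({', '.join(names)})"
--         for status, grp in groupby(tagged, key=lambda t: t[0])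
--         for names in [[name for _, name in grp]]
--     ]
--     parts.append("详情：python main.py health")
--     return "; ".join(parts)
-- ===== Notes on version B (the rewrite author's own statement) =====
-- stated objective: alternative
-- what changed: Replaces A's two independent filtered scans plus hand-built conditional parts with a tag/stable-sort/groupby pipeline: flagged names are tagged with their status, stably sorted warn-before-error, and the summary parts are formatted generically from the adjacent runs of itertools.groupby.
import Mathlib
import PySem

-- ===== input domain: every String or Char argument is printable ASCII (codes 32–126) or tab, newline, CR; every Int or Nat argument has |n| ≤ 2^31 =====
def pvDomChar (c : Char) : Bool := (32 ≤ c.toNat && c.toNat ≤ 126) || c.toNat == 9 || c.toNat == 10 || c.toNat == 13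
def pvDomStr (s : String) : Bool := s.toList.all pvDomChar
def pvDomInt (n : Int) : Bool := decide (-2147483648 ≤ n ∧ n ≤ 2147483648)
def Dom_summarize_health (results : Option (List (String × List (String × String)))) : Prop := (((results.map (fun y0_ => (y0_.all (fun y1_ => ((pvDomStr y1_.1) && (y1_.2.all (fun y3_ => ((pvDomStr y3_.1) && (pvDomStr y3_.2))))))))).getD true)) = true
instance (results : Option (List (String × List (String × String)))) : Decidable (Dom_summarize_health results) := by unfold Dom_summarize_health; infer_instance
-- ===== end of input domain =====

-- B replaces A's two filtered scans and hand-built conditional parts by a tag → stable sort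
-- (warn before error) → groupby pipeline that formats the summary parts generically
-- (objective: alternative).

-- ===== PORT A =====
-- result.get("status") on the inner dict (first match in the association list);
-- isinstance(result, Mapping) is always true under the typed domain (inner values are dicts).
def pvStatus (r : List (String × String)) : Option String :=
  (PySem.Dict.mk r).get? "status"

def summarize_health (results : Option (List (String × List (String × String)))) : String :=
  match results with
  | none => "skipped"
  | some rs =>
    if rs = [] then "skipped"
    else
      let warns := (rs.filter (fun p => pvStatus p.2 = some "warn")).map Prod.fst
      let errors := (rs.filter (fun p => pvStatus p.2 = some "error")).map Prod.fst
      if warns = [] ∧ errors = [] then "all checks passed"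
      else
        let parts : List String := []
        let parts := if warns ≠ [] then
            parts ++ [PySem.Int.toStr (PySem.List.len warns) ++ " warn (" ++
              PySem.Str.join ", " warns ++ ")"]
          else parts
        let parts := if errors ≠ [] then
            parts ++ [PySem.Int.toStr (PySem.List.len errors) ++ " error (" ++
              PySem.Str.join ", " errors ++ ")"]
          else parts
        PySem.Str.join "; " (parts ++ ["详情：python main.py health"])

-- ===== PORT B =====
-- the guarded comprehension: (result.get("status"), name) for flagged entries only
def pvTag (rs : List (String × List (String × String))) : List (String × String) :=
  rs.filterMap (fun p =>
    match pvStatus p.2 with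
    | some s => if s = "warn" ∨ s = "error" then some (s, p.1) else none
    | none => none)

-- sort key lambda t: t[0] != "warn"  (False < True, encoded 0/1)
def pvKey (t : String × String) : Int := if t.1 = "warn" then 0 else 1

-- itertools.groupby on the first component: adjacent runs, keeping the names of each run
def pvGroupBy : List (String × String) → List (String × List String)
  | [] => []
  | (s, n) :: rest =>
    match pvGroupBy rest with
    | [] => [(s, [n])]
    | (s', ns) :: gs => if s = s' then (s, n :: ns) :: gs else (s, [n]) :: (s', ns) :: gs

def summarize_health_alt (results : Option (List (String × List (String × String)))) : String :=
  match results with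
  | none => "skipped"
  | some rs =>
    if rs = [] then "skipped"
    else
      let tagged := pvTag rs
      if tagged = [] then "all checks passed"
      else
        let sortedT := PySem.List.sorted tagged pvKey
        let parts := (pvGroupBy sortedT).map (fun g =>
          PySem.Int.toStr (PySem.List.len g.2) ++ " " ++ g.1 ++ " (" ++
            PySem.Str.join ", " g.2 ++ ")")
        PySem.Str.join "; " (parts ++ ["详情：python main.py health"])

-- ===== PRECONDITION & SPEC =====
def Spec_summarize_health (results : Option (List (String × List (String × String)))) (out : String) : Prop := out = summarize_health_alt results
instance (results : Option (List (String × List (String × String)))) (out : String) : Decidable (Spec_summarize_health results out) := by unfold Spec_summarize_health; infer_instance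

-- ===== CLAIM (what is proved, stated in full; the proofs are below) =====
def Claim_equal_summarize_health : Prop := ∀ (results : Option (List (String × List (String × String)))), Dom_summarize_health results → Spec_summarize_health results (summarize_health results)

-- ===== LEMMAS AND PROOFS =====
theorem pvInsertBy_nil {α : Type} (before : α → α → Bool) (x : α) :
    PySem.List.insertBy before x [] = [x] := by
  simp [PySem.List.insertBy]

theorem pvInsertBy_cons {α : Type} (before : α → α → Bool) (x y : α) (ys : List α) :
    PySem.List.insertBy before x (y :: ys) =
      if before x y then x :: y :: ys else y :: PySem.List.insertBy before x ys := by
  simp [PySem.List.insertBy]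

-- inserting an element no earlier element beats goes to the very end
theorem pvInsertBy_last {α : Type} (before : α → α → Bool) (x : α) (l : List α)
    (h : ∀ y ∈ l, before x y = false) :
    PySem.List.insertBy before x l = l ++ [x] := by
  induction l with
  | nil => simp [pvInsertBy_nil]
  | cons y ys ih =>
    have hy : before x y = false := h y List.mem_cons_self
    rw [pvInsertBy_cons, hy, ih (fun z hz => h z (List.mem_cons_of_mem _ hz))]
    simp

-- stable insertion between the kept prefix and the strictly greater suffix
theorem pvInsertBy_mid {α : Type} (before : α → α → Bool) (x : α) (w e : List α)
    (hw : ∀ y ∈ w, before x y = false) (he : ∀ y ∈ e, before x y = true) :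
    PySem.List.insertBy before x (w ++ e) = w ++ x :: e := by
  induction w with
  | nil =>
    cases e with
    | nil => simp [pvInsertBy_nil]
    | cons y ys =>
      have hy : before x y = true := he y List.mem_cons_self
      simp only [List.nil_append]
      rw [pvInsertBy_cons, hy]
      simp
  | cons a as ih =>
    have ha : before x a = false := hw a List.mem_cons_self
    simp only [List.cons_append]
    rw [pvInsertBy_cons, ha, ih (fun z hz => hw z (List.mem_cons_of_mem _ hz))]
    simp

-- invariant of the insertion-sort fold under the binary key: warns stay in front, in order
theorem pvSort_split (ts w e : List (String × String))
    (hw : ∀ t ∈ w, pvKey t = 0) (he : ∀ t ∈ e, pvKey t = 1) :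
    ts.foldl (fun acc x =>
        PySem.List.insertBy (fun a b => decide (pvKey a < pvKey b)) x acc) (w ++ e)
      = (w ++ ts.filter (fun t => t.1 = "warn")) ++
        (e ++ ts.filter (fun t => ¬ (t.1 = "warn"))) := by
  induction ts generalizing w e with
  | nil => simp
  | cons t ts ih =>
    simp only [List.foldl_cons, List.filter_cons]
    by_cases h : t.1 = "warn"
    · have hk : pvKey t = 0 := by simp [pvKey, h]
      rw [pvInsertBy_mid _ _ w e (fun y hy => by simp [hk, hw y hy])
          (fun y hy => by simp [hk, he y hy]),
        show w ++ t :: e = (w ++ [t]) ++ e by simp,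
        ih (w ++ [t]) e (by
          intro z hz
          rcases List.mem_append.mp hz with hz | hz
          · exact hw z hz
          · simp at hz; subst hz; exact hk) he]
      simp [h]
    · have hk : pvKey t = 1 := by simp [pvKey, h]
      rw [pvInsertBy_last _ _ (w ++ e) (by
          intro y hy
          rcases List.mem_append.mp hy with hy | hy
          · simp [hk, hw y hy]
          · simp [hk, he y hy]),
        show (w ++ e) ++ [t] = w ++ (e ++ [t]) by simp,
        ih w (e ++ [t]) hw (by
          intro z hz
          rcases List.mem_append.mp hz with hz | hz
          · exact he z hz
          · simp at hz; subst hz; exact hk)]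
      simp [h]

-- the stable sort under the binary key is exactly "warn entries then the rest"
theorem pvSorted_eq (ts : List (String × String)) :
    PySem.List.sorted ts pvKey
      = ts.filter (fun t => t.1 = "warn") ++ ts.filter (fun t => ¬ (t.1 = "warn")) := by
  have h := pvSort_split ts [] [] (by simp) (by simp)
  simpa [PySem.List.sorted] using h

-- B's tagged list, filtered to warns, is A's warn scan (tagged with the literal status)
theorem pvTag_warn (rs : List (String × List (String × String))) :
    (pvTag rs).filter (fun t => t.1 = "warn")
      = (rs.filter (fun p => pvStatus p.2 = some "warn")).map (fun p => ("warn", p.1)) := by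
  induction rs with
  | nil => simp [pvTag]
  | cons p rs ih =>
    simp only [pvTag, List.filterMap_cons, List.filter_cons] at *
    cases hs : pvStatus p.2 with
    | none => simp [ih]
    | some s =>
      by_cases h1 : s = "warn"
      · simp [h1, ih]
      · by_cases h2 : s = "error" <;> simp [h1, h2, ih]

-- and filtered to non-warns it is A's error scan
theorem pvTag_error (rs : List (String × List (String × String))) :
    (pvTag rs).filter (fun t => ¬ (t.1 = "warn"))
      = (rs.filter (fun p => pvStatus p.2 = some "error")).map (fun p => ("error", p.1)) := by
  induction rs with
  | nil => simp [pvTag]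
  | cons p rs ih =>
    simp only [pvTag, List.filterMap_cons, List.filter_cons] at *
    simp only [decide_not] at ih
    cases hs : pvStatus p.2 with
    | none => simp [ih]
    | some s =>
      by_cases h1 : s = "warn"
      · simp [h1, ih]
      · by_cases h2 : s = "error" <;> simp [h1, h2, ih]

-- B's "nothing flagged" test agrees with A's "both scans empty" test
theorem pvTag_nil_iff (rs : List (String × List (String × String))) :
    pvTag rs = [] ↔
      (rs.filter (fun p => pvStatus p.2 = some "warn") = [] ∧
       rs.filter (fun p => pvStatus p.2 = some "error") = []) := by
  induction rs with
  | nil => simp [pvTag]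
  | cons p rs ih =>
    simp only [pvTag, List.filterMap_cons, List.filter_cons] at *
    cases hs : pvStatus p.2 with
    | none => simp [ih]
    | some s =>
      by_cases h1 : s = "warn"
      · simp [h1]
      · by_cases h2 : s = "error" <;> simp [h1, h2, ih]

-- one-step unfolding of the groupby recursion
theorem pvGroupBy_cons (s n : String) (L : List (String × String)) :
    pvGroupBy ((s, n) :: L) =
      match pvGroupBy L with
      | [] => [(s, [n])]
      | (s', ns) :: gs => if s = s' then (s, n :: ns) :: gs else (s, [n]) :: (s', ns) :: gs := rfl

-- groupby of a constant-key run is one group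
theorem pvGroupBy_const (s : String) (ns : List String) (h : ns ≠ []) :
    pvGroupBy (ns.map (fun n => (s, n))) = [(s, ns)] := by
  induction ns with
  | nil => cases h rfl
  | cons n ns ih =>
    cases ns with
    | nil => simp [pvGroupBy]
    | cons m ms =>
      rw [List.map_cons, pvGroupBy_cons, ih (by simp)]
      simp

-- groupby of a warn run followed by an error run is exactly two groups
theorem pvGroupBy_two (ws es : List String) (hw : ws ≠ []) (he : es ≠ []) :
    pvGroupBy (ws.map (fun n => ("warn", n)) ++ es.map (fun n => ("error", n)))
      = [("warn", ws), ("error", es)] := by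
  induction ws with
  | nil => cases hw rfl
  | cons n ns ih =>
    cases ns with
    | nil =>
      simp only [List.map_cons, List.map_nil, List.cons_append, List.nil_append]
      rw [pvGroupBy_cons, pvGroupBy_const "error" es he]
      simp
    | cons m ms =>
      simp only [List.map_cons, List.cons_append] at *
      rw [pvGroupBy_cons, ih (by simp)]
      simp

-- re-associating B's part strings into A's literal pieces
theorem pvPart_warn (x j : String) :
    x ++ " " ++ "warn" ++ " (" ++ j ++ ")" = x ++ " warn (" ++ j ++ ")" := by
  have h : x ++ " " ++ "warn" ++ " (" = x ++ " warn (" := by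
    rw [String.append_assoc, String.append_assoc]; rfl
  rw [h]

theorem pvPart_error (x j : String) :
    x ++ " " ++ "error" ++ " (" ++ j ++ ")" = x ++ " error (" ++ j ++ ")" := by
  have h : x ++ " " ++ "error" ++ " (" = x ++ " error (" := by
    rw [String.append_assoc, String.append_assoc]; rfl
  rw [h]

-- the sorted tagged list, written through A's two scans
theorem pvSorted_tag (rs : List (String × List (String × String))) :
    PySem.List.sorted (pvTag rs) pvKey
      = (((rs.filter (fun p => pvStatus p.2 = some "warn")).map Prod.fst).map
          (fun n => ("warn", n))) ++
        (((rs.filter (fun p => pvStatus p.2 = some "error")).map Prod.fst).map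
          (fun n => ("error", n))) := by
  rw [pvSorted_eq, pvTag_warn, pvTag_error]
  simp [List.map_map, Function.comp_def]

-- ===== VERDICT (by name: the statement is the Claim_ definition above) =====
theorem summarize_health_spec : Claim_equal_summarize_health := by
  intro results _
  unfold Spec_summarize_health summarize_health summarize_health_alt
  cases results with
  | none => rfl
  | some rs =>
    by_cases hrs : rs = []
    · simp [hrs]
    · simp only [hrs, if_false]
      by_cases hT : pvTag rs = []
      · obtain ⟨h1, h2⟩ := (pvTag_nil_iff rs).mp hT
        simp [hT, h1, h2]
      · have hne := (not_iff_not.mpr (pvTag_nil_iff rs)).mp hT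
        by_cases hW : rs.filter (fun p => pvStatus p.2 = some "warn") = []
        · have hE : rs.filter (fun p => pvStatus p.2 = some "error") ≠ [] :=
            fun h => hne ⟨hW, h⟩
          simp only [hT, hW, pvSorted_tag, List.map_nil, List.nil_append]
          rw [pvGroupBy_const "error" _ (by simp [hE])]
          simp [hE, pvPart_error]
        · by_cases hE : rs.filter (fun p => pvStatus p.2 = some "error") = []
          · simp only [hT, hE, pvSorted_tag, List.map_nil, List.append_nil]
            rw [pvGroupBy_const "warn" _ (by simp [hW])]
            simp [hW, pvPart_warn]
          · simp only [hT, pvSorted_tag]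
            rw [pvGroupBy_two _ _ (by simp [hW]) (by simp [hE])]
            simp [hW, hE, pvPart_warn, pvPart_error]
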